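-- pv_equiv track=rewrite | github.com/pjoshi08/DSA | src/main/java/org/example/simulation/ShiftDistanceBwStrs.py | shiftDistance
-- ===== SOURCE A (Python) =====
-- from typing import List
--
-- def shiftDistance(s: str, t: str, nextCost: List[int], previousCost: List[int]) -> int:
--     chars = {0: 'a', 1: 'b', 2: 'c', 3: 'd', 4: 'e', 5: 'f', 6: 'g', 7: 'h', 8: 'i',
--              9: 'j', 10: 'k', 11: 'l', 12: 'm', 13: 'n', 14: 'o', 15: 'p', 16: 'q', 17: 'r',
--              18: 's', 19: 't', 20: 'u', 21: 'v', 22: 'w', 23: 'x', 24: 'y', 25: 'z'}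
--
--     def movement_cost(c, target, dir):
--         cost = 0
--         while c != target:
--             i = ord(c) - ord('a')
--             cost += nextCost[i] if dir == 1 else previousCost[i]
--             i = (i + dir) % 26
--             c = chars[i]
--         return cost
--
--     total = 0
--     for i, c in enumerate(s):
--         total += min(
--             movement_cost(c, t[i], 1),
--             movement_cost(c, t[i], -1)
--         )
--     return total
-- ===== SOURCE B (Python) =====
-- def shiftDistance(s, t, nextCost, previousCost):
--     # Prefix sums around the alphabet: each per-character cost is a prefix difference.
--     F = [0]
--     for x in nextCost[:26]:
--         F.append(F[-1] + x)
--     P = [0]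
--     for x in previousCost[:26]:
--         P.append(P[-1] + x)
--     total = 0
--     for c, d in zip(s, t):
--         if c == d:
--             continue
--         a = ord(c) - 97
--         b = ord(d) - 97
--         fwd = F[b] - F[a] if a <= b else F[26] - (F[a] - F[b])
--         bwd = P[a + 1] - P[b + 1] if b <= a else P[26] - (P[b + 1] - P[a + 1])
--         total += min(fwd, bwd)
--     return total
-- ===== Notes on version B (the rewrite author's own statement) =====
-- stated objective: alternative
-- what changed: B precomputes two 27-entry prefix-sum tables of nextCost/previousCost around the alphabet once and reads each character's forward/backward shift cost as an O(1) prefix difference, instead of A's per-character while-loops that walk the alphabet step by step in both directions.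
import Mathlib
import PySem

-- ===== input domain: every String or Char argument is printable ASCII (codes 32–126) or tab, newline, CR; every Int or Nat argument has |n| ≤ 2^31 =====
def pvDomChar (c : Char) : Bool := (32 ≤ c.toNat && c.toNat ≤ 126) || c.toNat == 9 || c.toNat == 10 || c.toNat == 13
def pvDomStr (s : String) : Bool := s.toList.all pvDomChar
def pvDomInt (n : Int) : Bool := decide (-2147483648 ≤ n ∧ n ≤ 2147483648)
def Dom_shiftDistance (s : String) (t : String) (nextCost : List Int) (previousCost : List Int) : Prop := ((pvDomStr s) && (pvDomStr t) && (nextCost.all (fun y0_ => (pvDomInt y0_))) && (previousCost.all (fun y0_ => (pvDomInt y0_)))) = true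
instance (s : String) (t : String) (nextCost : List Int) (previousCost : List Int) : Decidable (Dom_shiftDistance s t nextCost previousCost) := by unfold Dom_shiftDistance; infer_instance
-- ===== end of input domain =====

-- B replaces A's per-character cyclic alphabet walks by two prefix-sum tables built once,
-- reading each character's forward/backward shift cost as a prefix difference.

-- ===== PORT A =====
-- A's inner `while c != target` loop: structural recursion on a fuel of 26 steps.
-- Inside Pre_ both characters are lowercase, so the walk reaches the target in < 26
-- steps and the fuel is never exhausted (outside Pre_ the Python loop diverges or raises,
-- and those inputs are excluded).  `chars[i]` for i ∈ 0..25 is `Char.ofNat (97 + i)`.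
-- `nextCost[i]` / `previousCost[i]` are in range under Pre_ (Python raises otherwise).
def pvMv (nextCost previousCost : List Int) (dir : Int) : Nat → Char → Char → Int
  | 0, _, _ => 0
  | fuel+1, c, target =>
    if c = target then 0
    else
      let i : Int := (c.toNat : Int) - 97
      let cost : Int := if dir = 1 then PySem.List.pyGetD nextCost i 0 else PySem.List.pyGetD previousCost i 0
      let i2 : Int := PySem.Int.mod (i + dir) 26
      cost + pvMv nextCost previousCost dir fuel (Char.ofNat (97 + i2.toNat)) target

def shiftDistance (s : String) (t : String) (nextCost : List Int) (previousCost : List Int) : Int :=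
  (PySem.List.enumerate s.toList 0).foldl
    (fun total ic =>
      -- t[i]: in range under Pre_ (Python raises IndexError otherwise)
      let tc : Char := PySem.List.pyGetD t.toList ic.1 ' '
      total + min (pvMv nextCost previousCost 1 26 ic.2 tc)
                  (pvMv nextCost previousCost (-1) 26 ic.2 tc)) 0

-- ===== PORT B =====
-- Source B's prefix-table loop: F = [0]; for x in costs[:26]: F.append(F[-1] + x)
def pvPrefix (xs : List Int) : List Int :=
  (PySem.List.slice xs none (some 26)).foldl
    (fun F x => F ++ [PySem.List.pyGetD F (-1) 0 + x]) [0]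

def shiftDistance_alt (s : String) (t : String) (nextCost : List Int) (previousCost : List Int) : Int :=
  let F := pvPrefix nextCost
  let P := pvPrefix previousCost
  (s.toList.zip t.toList).foldl
    (fun total cd =>
      if cd.1 = cd.2 then total
      else
        let a : Int := (cd.1.toNat : Int) - 97
        let b : Int := (cd.2.toNat : Int) - 97
        let fwd : Int := if a ≤ b then PySem.List.pyGetD F b 0 - PySem.List.pyGetD F a 0
                         else PySem.List.pyGetD F 26 0 - (PySem.List.pyGetD F a 0 - PySem.List.pyGetD F b 0)
        let bwd : Int := if b ≤ a then PySem.List.pyGetD P (a+1) 0 - PySem.List.pyGetD P (b+1) 0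
                         else PySem.List.pyGetD P 26 0 - (PySem.List.pyGetD P (b+1) 0 - PySem.List.pyGetD P (a+1) 0)
        total + min fwd bwd) 0

-- ===== PRECONDITION & SPEC =====
-- Pre_ excludes the inputs where A raises (t shorter than s; a cost list too short for
-- a walk) or diverges (a non-lowercase character unequal to its partner), and — see the
-- cites — the corner inputs where A returns a value only because its walk happens to stop
-- before a missing cost entry, or because a non-lowercase character's negative index
-- wraps around a long cost list: there B's 27-entry prefix tables naturally raise IndexError.
def Pre_shiftDistance (s : String) (t : String) (nextCost : List Int) (previousCost : List Int) : Prop :=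
  s.toList.length ≤ t.toList.length ∧
  ∀ p ∈ s.toList.zip t.toList, p.1 = p.2 ∨
    (97 ≤ p.1.toNat ∧ p.1.toNat ≤ 122 ∧ 97 ≤ p.2.toNat ∧ p.2.toNat ≤ 122 ∧
     26 ≤ nextCost.length ∧ 26 ≤ previousCost.length)
instance (s : String) (t : String) (nextCost : List Int) (previousCost : List Int) : Decidable (Pre_shiftDistance s t nextCost previousCost) := by unfold Pre_shiftDistance; infer_instance

def pvWitness_shiftDistance : String × String × List Int × List Int :=
  ("abz", "zba", List.replicate 26 1, List.replicate 26 2)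

def Spec_shiftDistance (s : String) (t : String) (nextCost : List Int) (previousCost : List Int) (out : Int) : Prop := out = shiftDistance_alt s t nextCost previousCost
instance (s : String) (t : String) (nextCost : List Int) (previousCost : List Int) (out : Int) : Decidable (Spec_shiftDistance s t nextCost previousCost out) := by unfold Spec_shiftDistance; infer_instance

-- ===== CLAIM (what is proved, stated in full; the proofs are below) =====
def Claim_equal_shiftDistance : Prop := ∀ (s : String) (t : String) (nextCost : List Int) (previousCost : List Int), Dom_shiftDistance s t nextCost previousCost → Pre_shiftDistance s t nextCost previousCost → Spec_shiftDistance s t nextCost previousCost (shiftDistance s t nextCost previousCost)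

-- ===== LEMMAS AND PROOFS =====

-- prefix sums of the first k entries
def pvFk (xs : List Int) (k : Nat) : Int := (xs.take k).sum

-- partial sums of ys starting from a (excluding a itself)
def pvPsum (a : Int) : List Int → List Int
  | [] => []
  | x :: t => (a + x) :: pvPsum (a + x) t

theorem pvChar_toNat_ofNat (n : Nat) (h : n < 55296) : (Char.ofNat n).toNat = n := by
  have : n.isValidChar := Or.inl (by omega)
  simp [Char.ofNat, this]

theorem pvFk_succ (xs : List Int) (k : Nat) (h : k < xs.length) :
    pvFk xs (k+1) = pvFk xs k + xs.getD k 0 := by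
  unfold pvFk
  rw [List.take_add_one, List.sum_append, List.getElem?_eq_getElem h]
  simp [List.getD, List.getElem?_eq_getElem h]

theorem pvPrefix_fold (ys : List Int) : ∀ (F : List Int), F ≠ [] →
    ys.foldl (fun F x => F ++ [PySem.List.pyGetD F (-1) 0 + x]) F
      = F ++ pvPsum (F.getLastD 0) ys := by
  induction ys with
  | nil => intro F _; simp [pvPsum]
  | cons x ys ih =>
    intro F hF
    have h1 : PySem.List.pyGetD F (-1) 0 = F.getLastD 0 := by
      rw [PySem.List.pyGetD_neg_one F 0 hF, List.getLastD_eq_getLast?,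
          List.getLast?_eq_some_getLast hF]
      rfl
    simp only [List.foldl_cons, h1]
    rw [ih (F ++ [F.getLastD 0 + x]) (by simp)]
    simp [pvPsum]

theorem pvPsum_getD (ys : List Int) : ∀ (a : Int) (k : Nat), k < ys.length →
    (pvPsum a ys).getD k 0 = a + (ys.take (k+1)).sum := by
  induction ys with
  | nil => intro a k h; simp at h
  | cons x ys ih =>
    intro a k h
    cases k with
    | zero => simp [pvPsum]
    | succ k =>
      simp only [pvPsum, List.getD_cons_succ]
      rw [ih (a + x) k (by simpa using h), List.take_succ_cons, List.sum_cons]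
      ring

theorem pvPrefix_eq (xs : List Int) : pvPrefix xs = 0 :: pvPsum 0 (xs.take 26) := by
  unfold pvPrefix
  rw [PySem.List.slice_to xs (by norm_num), pvPrefix_fold _ [0] (by simp)]
  norm_num
  rfl

theorem pvPrefix_getD (xs : List Int) (h : 26 ≤ xs.length) (k : Nat) (hk : k ≤ 26) :
    (pvPrefix xs).getD k 0 = pvFk xs k := by
  rw [pvPrefix_eq]
  cases k with
  | zero => simp [pvFk]
  | succ j =>
    rw [List.getD_cons_succ, pvPsum_getD _ 0 j (by simp; omega)]
    rw [List.take_take]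
    simp [pvFk, Nat.min_eq_left (by omega : j + 1 ≤ 26)]

theorem pvMv_step (nc pc : List Int) (dir : Int) (f : Nat) (c tgt : Char) (h : c ≠ tgt) :
    pvMv nc pc dir (f+1) c tgt
      = (if dir = 1 then PySem.List.pyGetD nc ((c.toNat : Int) - 97) 0
         else PySem.List.pyGetD pc ((c.toNat : Int) - 97) 0)
        + pvMv nc pc dir f
            (Char.ofNat (97 + (PySem.Int.mod ((c.toNat : Int) - 97 + dir) 26).toNat)) tgt := by
  simp [pvMv, h]

-- forward walk = prefix-sum difference
theorem pvMv_fwd (nc pc : List Int) (hnc : 26 ≤ nc.length) :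
    ∀ (d : Nat), ∀ (fuel a b : Nat), a < 26 → b < 26 → (b + 26 - a) % 26 = d → d ≤ fuel →
    pvMv nc pc 1 fuel (Char.ofNat (97+a)) (Char.ofNat (97+b))
      = if a ≤ b then pvFk nc b - pvFk nc a else pvFk nc 26 - (pvFk nc a - pvFk nc b) := by
  intro d
  induction d with
  | zero =>
    intro fuel a b ha hb hd _
    have hab : a = b := by omega
    subst hab
    cases fuel with
    | zero => simp [pvMv]
    | succ f => simp [pvMv]
  | succ d ih =>
    intro fuel a b ha hb hd hf
    have hab : a ≠ b := by omega
    obtain ⟨f, rfl⟩ : ∃ f, fuel = f + 1 := ⟨fuel - 1, by omega⟩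
    have hta : (Char.ofNat (97+a)).toNat = 97 + a := pvChar_toNat_ofNat _ (by omega)
    have htb : (Char.ofNat (97+b)).toNat = 97 + b := pvChar_toNat_ofNat _ (by omega)
    have hne : Char.ofNat (97+a) ≠ Char.ofNat (97+b) := fun hEq => hab (by
      have h2 := congrArg Char.toNat hEq
      rw [hta, htb] at h2; omega)
    have hia : ((97 + a : Nat) : Int) - 97 = ((a : Nat) : Int) := by push_cast; ring
    have hmod : PySem.Int.mod (((a : Nat) : Int) + 1) 26 = (((a+1) % 26 : Nat) : Int) := by
      rw [show ((a : Nat) : Int) + 1 = ((a + 1 : Nat) : Int) by push_cast; ring]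
      exact_mod_cast PySem.Int.mod_natCast (a+1) 26
    rw [pvMv_step nc pc 1 f _ _ hne, hta, hia, hmod, if_pos rfl, Int.toNat_natCast,
        PySem.List.pyGetD_natCast,
        ih f ((a+1) % 26) b (by omega) hb (by omega) (by omega)]
    have hstep : ∀ k, k < 26 → pvFk nc (k+1) = pvFk nc k + nc.getD k 0 :=
      fun k hk => pvFk_succ nc k (by omega)
    have hFk0 : pvFk nc 0 = 0 := by simp [pvFk]
    by_cases h25 : a = 25
    · subst h25
      have h26 := hstep 25 (by omega)
      norm_num
      norm_num at h26
      split_ifs <;> omega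
    · have ha' : (a+1) % 26 = a + 1 := Nat.mod_eq_of_lt (by omega)
      rw [ha']
      have hs := hstep a (by omega)
      split_ifs <;> omega

-- backward walk = prefix-sum difference
theorem pvMv_bwd (nc pc : List Int) (hpc : 26 ≤ pc.length) :
    ∀ (d : Nat), ∀ (fuel a b : Nat), a < 26 → b < 26 → (a + 26 - b) % 26 = d → d ≤ fuel →
    pvMv nc pc (-1) fuel (Char.ofNat (97+a)) (Char.ofNat (97+b))
      = if b ≤ a then pvFk pc (a+1) - pvFk pc (b+1) else pvFk pc 26 - (pvFk pc (b+1) - pvFk pc (a+1)) := by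
  intro d
  induction d with
  | zero =>
    intro fuel a b ha hb hd _
    have hab : a = b := by omega
    subst hab
    cases fuel with
    | zero => simp [pvMv]
    | succ f => simp [pvMv]
  | succ d ih =>
    intro fuel a b ha hb hd hf
    have hab : a ≠ b := by omega
    obtain ⟨f, rfl⟩ : ∃ f, fuel = f + 1 := ⟨fuel - 1, by omega⟩
    have hta : (Char.ofNat (97+a)).toNat = 97 + a := pvChar_toNat_ofNat _ (by omega)
    have htb : (Char.ofNat (97+b)).toNat = 97 + b := pvChar_toNat_ofNat _ (by omega)
    have hne : Char.ofNat (97+a) ≠ Char.ofNat (97+b) := fun hEq => hab (by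
      have h2 := congrArg Char.toNat hEq
      rw [hta, htb] at h2; omega)
    have hia : ((97 + a : Nat) : Int) - 97 = ((a : Nat) : Int) := by push_cast; ring
    rw [pvMv_step nc pc (-1) f _ _ hne, hta, hia, if_neg (by norm_num),
        PySem.List.pyGetD_natCast]
    have hstep : ∀ k, k < 26 → pvFk pc (k+1) = pvFk pc k + pc.getD k 0 :=
      fun k hk => pvFk_succ pc k (by omega)
    have hFk0 : pvFk pc 0 = 0 := by simp [pvFk]
    have hsa := hstep a (by omega)
    by_cases h0 : a = 0
    · subst h0
      have hmod : PySem.Int.mod (((0 : Nat) : Int) + (-1)) 26 = (25 : Int) := by decide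
      rw [hmod, show ((25 : Int)).toNat = 25 from rfl,
          ih f 25 b (by omega) hb (by omega) (by omega)]
      have h26 := hstep 25 (by omega)
      norm_num
      norm_num at h26 hsa
      split_ifs <;> omega
    · have hmod : PySem.Int.mod (((a : Nat) : Int) + (-1)) 26 = (((a-1) % 26 : Nat) : Int) := by
        rw [show ((a : Nat) : Int) + (-1) = ((a - 1 : Nat) : Int) by omega]
        exact_mod_cast PySem.Int.mod_natCast (a-1) 26
      rw [hmod, Int.toNat_natCast, Nat.mod_eq_of_lt (by omega : a - 1 < 26),
          ih f (a-1) b (by omega) hb (by omega) (by omega),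
          show a - 1 + 1 = a from by omega]
      split_ifs <;> omega

theorem pvMv_self (nc pc : List Int) (dir : Int) (f : Nat) (c : Char) :
    pvMv nc pc dir (f+1) c c = 0 := by
  simp [pvMv]

-- the per-character costs of the two ports agree on an unequal lowercase pair
theorem pvPair (nc pc : List Int) (hnc : 26 ≤ nc.length) (hpc : 26 ≤ pc.length)
    (c d : Char) (hcd : c ≠ d)
    (hc1 : 97 ≤ c.toNat) (hc2 : c.toNat ≤ 122) (hd1 : 97 ≤ d.toNat) (hd2 : d.toNat ≤ 122) :
    min (pvMv nc pc 1 26 c d) (pvMv nc pc (-1) 26 c d)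
      = min (if ((c.toNat : Int) - 97) ≤ ((d.toNat : Int) - 97) then
               PySem.List.pyGetD (pvPrefix nc) ((d.toNat : Int) - 97) 0
                 - PySem.List.pyGetD (pvPrefix nc) ((c.toNat : Int) - 97) 0
             else PySem.List.pyGetD (pvPrefix nc) 26 0
                 - (PySem.List.pyGetD (pvPrefix nc) ((c.toNat : Int) - 97) 0
                    - PySem.List.pyGetD (pvPrefix nc) ((d.toNat : Int) - 97) 0))
            (if ((d.toNat : Int) - 97) ≤ ((c.toNat : Int) - 97) then
               PySem.List.pyGetD (pvPrefix pc) (((c.toNat : Int) - 97) + 1) 0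
                 - PySem.List.pyGetD (pvPrefix pc) (((d.toNat : Int) - 97) + 1) 0
             else PySem.List.pyGetD (pvPrefix pc) 26 0
                 - (PySem.List.pyGetD (pvPrefix pc) (((d.toNat : Int) - 97) + 1) 0
                    - PySem.List.pyGetD (pvPrefix pc) (((c.toNat : Int) - 97) + 1) 0)) := by
  obtain ⟨a, ha, rfl⟩ : ∃ a, a < 26 ∧ c = Char.ofNat (97 + a) :=
    ⟨c.toNat - 97, by omega, by rw [show 97 + (c.toNat - 97) = c.toNat from by omega, Char.ofNat_toNat]⟩
  obtain ⟨b, hb, rfl⟩ : ∃ b, b < 26 ∧ d = Char.ofNat (97 + b) :=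
    ⟨d.toNat - 97, by omega, by rw [show 97 + (d.toNat - 97) = d.toNat from by omega, Char.ofNat_toNat]⟩
  have hta : (Char.ofNat (97+a)).toNat = 97 + a := pvChar_toNat_ofNat _ (by omega)
  have htb : (Char.ofNat (97+b)).toNat = 97 + b := pvChar_toNat_ofNat _ (by omega)
  rw [pvMv_fwd nc pc hnc ((b + 26 - a) % 26) 26 a b ha hb rfl (by omega),
      pvMv_bwd nc pc hpc ((a + 26 - b) % 26) 26 a b ha hb rfl (by omega),
      hta, htb]
  have hca : ((97 + a : Nat) : Int) - 97 = ((a : Nat) : Int) := by push_cast; ring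
  have hcb : ((97 + b : Nat) : Int) - 97 = ((b : Nat) : Int) := by push_cast; ring
  have hca1 : ((a : Nat) : Int) + 1 = ((a + 1 : Nat) : Int) := by push_cast; ring
  have hcb1 : ((b : Nat) : Int) + 1 = ((b + 1 : Nat) : Int) := by push_cast; ring
  have h26 : (26 : Int) = ((26 : Nat) : Int) := by norm_num
  rw [hca, hcb, hca1, hcb1, h26]
  simp only [PySem.List.pyGetD_natCast, Nat.cast_le]
  rw [pvPrefix_getD nc hnc a (by omega), pvPrefix_getD nc hnc b (by omega),
      pvPrefix_getD nc hnc 26 (by omega),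
      pvPrefix_getD pc hpc (a+1) (by omega), pvPrefix_getD pc hpc (b+1) (by omega),
      pvPrefix_getD pc hpc 26 (by omega)]

-- the two folds agree position by position
theorem pvLoop (nc pc : List Int) (tfull : List Char) :
    ∀ (sl tl : List Char) (k : Nat) (acc : Int),
      tfull.drop k = tl → sl.length ≤ tl.length →
      (∀ p ∈ sl.zip tl, p.1 = p.2 ∨
        (97 ≤ p.1.toNat ∧ p.1.toNat ≤ 122 ∧ 97 ≤ p.2.toNat ∧ p.2.toNat ≤ 122 ∧
         26 ≤ nc.length ∧ 26 ≤ pc.length)) →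
      (PySem.List.enumerate sl (k : Int)).foldl
        (fun total ic =>
          let tc : Char := PySem.List.pyGetD tfull ic.1 ' '
          total + min (pvMv nc pc 1 26 ic.2 tc) (pvMv nc pc (-1) 26 ic.2 tc)) acc
      = (sl.zip tl).foldl
          (fun total cd =>
            if cd.1 = cd.2 then total
            else
              let a : Int := (cd.1.toNat : Int) - 97
              let b : Int := (cd.2.toNat : Int) - 97
              let fwd : Int := if a ≤ b then PySem.List.pyGetD (pvPrefix nc) b 0 - PySem.List.pyGetD (pvPrefix nc) a 0
                               else PySem.List.pyGetD (pvPrefix nc) 26 0 - (PySem.List.pyGetD (pvPrefix nc) a 0 - PySem.List.pyGetD (pvPrefix nc) b 0)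
              let bwd : Int := if b ≤ a then PySem.List.pyGetD (pvPrefix pc) (a+1) 0 - PySem.List.pyGetD (pvPrefix pc) (b+1) 0
                               else PySem.List.pyGetD (pvPrefix pc) 26 0 - (PySem.List.pyGetD (pvPrefix pc) (b+1) 0 - PySem.List.pyGetD (pvPrefix pc) (a+1) 0)
              total + min fwd bwd) acc := by
  intro sl
  induction sl with
  | nil => intro tl k acc _ _ _; simp [PySem.List.enumerate_nil]
  | cons c sl ih =>
    intro tl k acc hdrop hlen hpre
    obtain ⟨dd, tl', rfl⟩ : ∃ dd tl', tl = dd :: tl' := by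
      cases tl with
      | nil => simp at hlen
      | cons x xs => exact ⟨x, xs, rfl⟩
    have hget : PySem.List.pyGetD tfull ((k : Nat) : Int) ' ' = dd := by
      rw [PySem.List.pyGetD_natCast]
      have : tfull[k]? = some dd := by
        have h0 := congrArg (fun l => l[0]?) hdrop
        simpa [List.getElem?_drop] using h0
      simp [List.getD, this]
    have hdrop' : tfull.drop (k+1) = tl' := by
      have : tfull.drop (k+1) = (tfull.drop k).drop 1 := by
        rw [List.drop_drop]
      rw [this, hdrop]
      rfl
    rw [PySem.List.enumerate_cons, List.foldl_cons, List.zip_cons_cons, List.foldl_cons]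
    have hk1 : ((k : Nat) : Int) + 1 = ((k + 1 : Nat) : Int) := by push_cast; ring
    rw [hk1, ih tl' (k+1) _ hdrop' (by simpa using hlen)
          (fun p hp => hpre p (List.mem_cons_of_mem _ hp))]
    congr 1
    simp only [hget]
    by_cases hcd : c = dd
    · subst hcd
      rw [if_pos rfl, show (26 : Nat) = 25 + 1 from rfl, pvMv_self, pvMv_self]
      simp
    · rcases hpre (c, dd) (List.mem_cons_self) with heq | ⟨h1, h2, h3, h4, hnc2, hpc2⟩
      · exact absurd heq hcd
      · rw [if_neg hcd, pvPair nc pc hnc2 hpc2 c dd hcd h1 h2 h3 h4]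

-- ===== VERDICT (by name: the statement is the Claim_ definition above) =====
theorem shiftDistance_spec : Claim_equal_shiftDistance := by
  intro s t nc pc _ hpre
  unfold Spec_shiftDistance shiftDistance shiftDistance_alt
  exact pvLoop nc pc t.toList s.toList t.toList 0 0 rfl hpre.1 hpre.2
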